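-- pv_equiv track=rewrite | github.com/yasheng-chen/unet_ich_edema | util.py | unet_dim_calculator_v2
-- ===== SOURCE A (Python) =====
-- def unet_dim_calculator_v2(pred_size, n_layers):
--
--     # get min dimension
--     min_size = pred_size
--     for i in range(n_layers-1):
--         min_size = (min_size + 4)//2
--
--     # get fixed output dimension
--     true_pred_size = min_size
--     for i in range(n_layers-1):
--         true_pred_size = 2*true_pred_size - 4
--
--     input_size = min_size + 4
--     for i in range(n_layers-1):
--         input_size = 2*input_size+4
--
--     return input_size, true_pred_size, min_size
-- ===== SOURCE B (Python) =====
-- def unet_dim_calculator_v2(pred_size, n_layers):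
--     k = max(n_layers - 1, 0)
--     min_size = pred_size
--     for _ in range(k):
--         min_size = (min_size + 4) // 2
--     # closed forms for the geometric recurrences x -> 2x-4 and x -> 2x+4
--     true_pred_size = 4 + (min_size - 4) * 2**k
--     input_size = (min_size + 8) * 2**k - 4
--     return input_size, true_pred_size, min_size
-- ===== Notes on version B (the rewrite author's own statement) =====
-- stated objective: simpler
-- what changed: The two back-multiplying loops are replaced by closed-form solutions of the recurrences x->2x-4 and x->2x+4 (true_pred = 4+(min-4)*2^k, input = (min+8)*2^k-4 with k = max(n_layers-1,0)); only the floor-division loop for min_size, which has no clean closed form, is kept.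
import Mathlib
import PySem

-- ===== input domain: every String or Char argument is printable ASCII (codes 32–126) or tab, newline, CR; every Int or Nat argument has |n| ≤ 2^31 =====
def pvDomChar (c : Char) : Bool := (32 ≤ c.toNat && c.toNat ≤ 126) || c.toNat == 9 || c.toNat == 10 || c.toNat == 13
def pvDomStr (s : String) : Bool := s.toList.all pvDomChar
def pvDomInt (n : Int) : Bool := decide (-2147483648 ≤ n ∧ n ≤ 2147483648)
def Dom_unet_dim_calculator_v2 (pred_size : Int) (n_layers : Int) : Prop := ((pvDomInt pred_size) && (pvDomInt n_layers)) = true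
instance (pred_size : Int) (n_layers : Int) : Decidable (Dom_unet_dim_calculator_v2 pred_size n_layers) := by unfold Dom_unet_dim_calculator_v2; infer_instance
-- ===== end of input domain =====

-- ===== PORT A =====
-- Literal port of A: three loops over range(n_layers-1).
def unet_dim_calculator_v2 (pred_size : Int) (n_layers : Int) : Int × Int × Int :=
  let min_size := (PySem.List.pyRange 0 (n_layers - 1) 1).foldl (fun s _ => PySem.Int.floordiv (s + 4) 2) pred_size
  let true_pred_size := (PySem.List.pyRange 0 (n_layers - 1) 1).foldl (fun s _ => 2 * s - 4) min_size
  let input_size := (PySem.List.pyRange 0 (n_layers - 1) 1).foldl (fun s _ => 2 * s + 4) (min_size + 4)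
  (input_size, true_pred_size, min_size)

-- ===== PORT B =====
-- Port of B: one loop for min_size, closed forms for the other two dimensions.
def unet_dim_calculator_v2_alt (pred_size : Int) (n_layers : Int) : Int × Int × Int :=
  let k := max (n_layers - 1) 0
  let min_size := (List.range k.toNat).foldl (fun s _ => PySem.Int.floordiv (s + 4) 2) pred_size
  let true_pred_size := 4 + (min_size - 4) * 2 ^ k.toNat
  let input_size := (min_size + 8) * 2 ^ k.toNat - 4
  (input_size, true_pred_size, min_size)

-- ===== PRECONDITION & SPEC =====
def Spec_unet_dim_calculator_v2 (pred_size : Int) (n_layers : Int) (out : Int × Int × Int) : Prop := out = unet_dim_calculator_v2_alt pred_size n_layers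
instance (pred_size : Int) (n_layers : Int) (out : Int × Int × Int) : Decidable (Spec_unet_dim_calculator_v2 pred_size n_layers out) := by unfold Spec_unet_dim_calculator_v2; infer_instance

-- ===== CLAIM (what is proved, stated in full; the proofs are below) =====
def Claim_equal_unet_dim_calculator_v2 : Prop := ∀ (pred_size : Int) (n_layers : Int), Dom_unet_dim_calculator_v2 pred_size n_layers → Spec_unet_dim_calculator_v2 pred_size n_layers (unet_dim_calculator_v2 pred_size n_layers)

-- ===== LEMMAS AND PROOFS =====

-- ===== VERDICT (by name: the statement is the Claim_ definition above) =====
-- a fold whose step ignores the element depends only on the list's length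
theorem foldl_const_len {α β : Type} (f : Int → Int) (l1 : List α) (l2 : List β) (x : Int)
    (h : l1.length = l2.length) :
    l1.foldl (fun s _ => f s) x = l2.foldl (fun s _ => f s) x := by
  induction l1 generalizing l2 x with
  | nil => cases l2 <;> simp_all
  | cons a t ih =>
    cases l2 with
    | nil => simp at h
    | cons b t2 => simp only [List.foldl_cons]; exact ih t2 (f x) (by simpa using h)

theorem foldl_mul_sub {α : Type} (l : List α) (x : Int) :
    l.foldl (fun s _ => 2 * s - 4) x = (x - 4) * 2 ^ l.length + 4 := by
  induction l generalizing x with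
  | nil => simp
  | cons a t ih => simp only [List.foldl_cons, ih, List.length_cons, pow_succ]; ring

theorem foldl_mul_add {α : Type} (l : List α) (x : Int) :
    l.foldl (fun s _ => 2 * s + 4) x = (x + 4) * 2 ^ l.length - 4 := by
  induction l generalizing x with
  | nil => simp
  | cons a t ih => simp only [List.foldl_cons, ih, List.length_cons, pow_succ]; ring

theorem unet_dim_calculator_v2_spec : Claim_equal_unet_dim_calculator_v2 := by
  intro pred_size n_layers _
  unfold Spec_unet_dim_calculator_v2 unet_dim_calculator_v2 unet_dim_calculator_v2_alt
  have hlen : (PySem.List.pyRange 0 (n_layers - 1) 1).length = (List.range (max (n_layers - 1) 0).toNat).length := by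
    rw [PySem.List.length_pyRange_one, List.length_range]
    omega
  have hmin : (PySem.List.pyRange 0 (n_layers - 1) 1).foldl (fun s _ => PySem.Int.floordiv (s + 4) 2) pred_size
      = (List.range (max (n_layers - 1) 0).toNat).foldl (fun s _ => PySem.Int.floordiv (s + 4) 2) pred_size :=
    foldl_const_len _ _ _ _ hlen
  simp only [foldl_mul_sub, foldl_mul_add, hmin, hlen, List.length_range]
  rw [Prod.mk.injEq, Prod.mk.injEq]
  refine ⟨by ring, by ring, rfl⟩
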